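-- pv_equiv track=rewrite | github.com/JSYoo5B/TIL | PS/BOJ/20058/20058.py | firestorm
-- ===== SOURCE A (Python) =====
-- import copy
--
-- def firestorm(ice_board, board_size, level):
--     # split grids
--     for r in range(1, board_size, 2 ** level):
--         for c in range(1, board_size, 2 ** level):
--             spin_grids(ice_board, [r, c], level)
--
--     # melt ices
--     melted_board = copy.deepcopy(ice_board)
--     for r in range(1, board_size + 1):
--         for c in range(1, board_size + 1):
--             neighbors = [ ice_board[r-1][c], ice_board[r+1][c], \
--                     ice_board[r][c-1], ice_board[r][c+1] ]
--             if neighbors.count(0) > 1 and ice_board[r][c] > 0: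
--                 melted_board[r][c] -= 1
--     return melted_board
--
-- def spin_grids(ice_board, start_pos, level):
--     if level < 1:
--         return
--     for r in range(2 ** (level - 1)):
--         for c in range(2 ** (level - 1)):
--             tl = [start_pos[0] + r, start_pos[1] + c]
--             tr = [start_pos[0] + c, start_pos[1] + 2 ** level - 1 - r]
--             bl = [start_pos[0] + 2 ** level - 1 - c, start_pos[1] + r]
--             br = [start_pos[0] + 2 ** level - 1 - r, start_pos[1] + 2 ** level - 1 - c]
--             ices = [ ice_board[p[0]][p[1]] for p in [tl, tr, br, bl] ]
--             ice_board[tl[0]][tl[1]] = ices[3]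
--             ice_board[tr[0]][tr[1]] = ices[0]
--             ice_board[br[0]][br[1]] = ices[1]
--             ice_board[bl[0]][bl[1]] = ices[2]
-- ===== SOURCE B (Python) =====
-- # B: rotates each subgrid by a direct source->destination index mapping (build the
-- # rotated block, then write it back row by row), and melts via a single comprehension
-- # building the result grid, instead of A's four-cell cycle swaps and cell-by-cell
-- # decrements on a deepcopy. Like A, it leaves ice_board rotated in place (same
-- # observable mutation); the equivalence claimed is about the return value.
-- def firestorm(ice_board, board_size, level):
--     size = 2 ** level
--     # rotate every subgrid clockwise by direct index mapping
--     for r0 in range(1, board_size, size):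
--         for c0 in range(1, board_size, size):
--             block = [[ice_board[r0 + size - 1 - b][c0 + a] for b in range(size)]
--                      for a in range(size)]
--             for a in range(size):
--                 ice_board[r0 + a][c0:c0 + size] = block[a]
--     # melt: build the result grid in one pass
--     def cell(r, c, v):
--         if 1 <= r <= board_size and 1 <= c <= board_size and v > 0:
--             zeros = sum(1 for p, q in ((r-1, c), (r+1, c), (r, c-1), (r, c+1))
--                         if ice_board[p][q] == 0)
--             if zeros > 1:
--                 return v - 1
--         return v
--     return [[cell(r, c, v) for c, v in enumerate(row)] for r, row in enumerate(ice_board)]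
-- ===== Notes on version B (the rewrite author's own statement) =====
-- stated objective: alternative
-- what changed: Rotation rewritten as a direct source-to-destination index mapping that builds each rotated subgrid block and writes it back row by row (instead of A's in-place four-cell cycle swaps over the quarter block), and melting rewritten as a single comprehension building the result grid (instead of A's cell-by-cell decrements on a deepcopy).
import Mathlib
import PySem

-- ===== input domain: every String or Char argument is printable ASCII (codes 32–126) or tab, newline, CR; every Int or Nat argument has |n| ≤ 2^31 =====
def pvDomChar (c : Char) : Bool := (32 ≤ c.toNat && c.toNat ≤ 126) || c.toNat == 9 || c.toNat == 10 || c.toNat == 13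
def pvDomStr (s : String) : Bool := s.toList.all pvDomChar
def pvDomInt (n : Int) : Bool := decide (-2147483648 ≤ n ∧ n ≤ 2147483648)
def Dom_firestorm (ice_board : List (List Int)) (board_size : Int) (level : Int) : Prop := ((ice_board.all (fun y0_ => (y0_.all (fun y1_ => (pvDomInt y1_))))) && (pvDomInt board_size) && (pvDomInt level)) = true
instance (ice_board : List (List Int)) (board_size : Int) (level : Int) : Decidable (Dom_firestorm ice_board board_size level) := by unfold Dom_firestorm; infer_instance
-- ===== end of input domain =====

-- B rotates each subgrid by a direct source→destination index mapping and melts in one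
-- comprehension pass, instead of A's four-cell cycle swaps and cell-by-cell decrements
-- (objective: alternative decomposition, same asymptotic cost).  Like A, the Python B
-- mutates ice_board (leaves it rotated); the equivalence proved is about the return value.

-- ===== PORT A =====
-- ice_board[x][y] read/write: exact for 0 ≤ index < length (guaranteed by Pre_; Python
-- raises IndexError outside that range, and negative indices never occur on Pre_ inputs).
def gget (g : List (List Int)) (x y : Int) : Int := (g.getD x.toNat []).getD y.toNat 0

def gset (g : List (List Int)) (x y v : Int) : List (List Int) :=
  g.set x.toNat ((g.getD x.toNat []).set y.toNat v)

-- the body of spin_grids' inner loop, at quarter coordinates q = (r, c)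
def spinStep (sr sc S : Int) (g : List (List Int)) (q : Int × Int) : List (List Int) :=
  let tl := (sr + q.1, sc + q.2)
  let tr := (sr + q.2, sc + S - 1 - q.1)
  let bl := (sr + S - 1 - q.2, sc + q.1)
  let br := (sr + S - 1 - q.1, sc + S - 1 - q.2)
  let ices := [gget g tl.1 tl.2, gget g tr.1 tr.2, gget g br.1 br.2, gget g bl.1 bl.2]
  let g1 := gset g tl.1 tl.2 (ices.getD 3 0)
  let g2 := gset g1 tr.1 tr.2 (ices.getD 0 0)
  let g3 := gset g2 br.1 br.2 (ices.getD 1 0)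
  gset g3 bl.1 bl.2 (ices.getD 2 0)

-- 2 ** (level - 1) as a Nat exponent: exact because spin_grids only loops when level ≥ 1
def spinGrids (g : List (List Int)) (startPos : Int × Int) (level : Int) : List (List Int) :=
  if level < 1 then g
  else
    (PySem.List.pyRange 0 (2 ^ (level - 1).toNat) 1).foldl (fun g r =>
      (PySem.List.pyRange 0 (2 ^ (level - 1).toNat) 1).foldl (fun g c =>
        spinStep startPos.1 startPos.2 (2 ^ level.toNat) g (r, c)) g) g

-- the body of A's melting loop (reads neighbors in ice, decrements in m)
def meltStep (ice : List (List Int)) (r : Int) (m : List (List Int)) (c : Int) : List (List Int) :=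
  let neighbors := [gget ice (r - 1) c, gget ice (r + 1) c, gget ice r (c - 1), gget ice r (c + 1)]
  if 1 < neighbors.count 0 ∧ 0 < gget ice r c then gset m r c (gget m r c - 1) else m

-- 2 ** level : exact for 0 ≤ level (Pre_); Python raises TypeError for negative level.
def firestorm (ice_board : List (List Int)) (board_size : Int) (level : Int) : List (List Int) :=
  let g1 := (PySem.List.pyRange 1 board_size ((2 : Int) ^ level.toNat)).foldl (fun g r =>
      (PySem.List.pyRange 1 board_size ((2 : Int) ^ level.toNat)).foldl
        (fun g c => spinGrids g (r, c) level) g) ice_board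
  (PySem.List.pyRange 1 (board_size + 1) 1).foldl (fun m r =>
    (PySem.List.pyRange 1 (board_size + 1) 1).foldl (meltStep g1 r) m) g1

-- ===== PORT B =====
-- block[a][b] = ice[r0+S-1-b][c0+a]; then the slice assignment ice[r0+a][c0:c0+S] = block[a]
-- (an equal-length slice write: exact when 0 ≤ c0 and c0+S ≤ len(row), guaranteed by Pre_)
def rotateBlock (g : List (List Int)) (r0 c0 S : Int) : List (List Int) :=
  let block := (PySem.List.pyRange 0 S 1).map (fun a =>
    (PySem.List.pyRange 0 S 1).map (fun b => gget g (r0 + S - 1 - b) (c0 + a)))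
  g.mapIdx (fun x row =>
    if r0 ≤ (x : Int) ∧ (x : Int) < r0 + S then
      row.take c0.toNat ++ block.getD ((x : Int) - r0).toNat [] ++ row.drop (c0 + S).toNat
    else row)

-- Source B's cell(r, c, v)
def meltCell (ice : List (List Int)) (n : Int) (r c v : Int) : Int :=
  if 1 ≤ r ∧ r ≤ n ∧ 1 ≤ c ∧ c ≤ n ∧ 0 < v then
    if 1 < ([((r - 1, c)), ((r + 1, c)), ((r, c - 1)), ((r, c + 1))].filter
              (fun p => gget ice p.1 p.2 == 0)).length
    then v - 1 else v
  else v

def firestorm_alt (ice_board : List (List Int)) (board_size : Int) (level : Int) : List (List Int) :=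
  let g1 := (PySem.List.pyRange 1 board_size ((2 : Int) ^ level.toNat)).foldl (fun g r0 =>
      (PySem.List.pyRange 1 board_size ((2 : Int) ^ level.toNat)).foldl
        (fun g c0 => rotateBlock g r0 c0 (2 ^ level.toNat)) g) ice_board
  g1.mapIdx (fun r row => row.mapIdx (fun c v => meltCell g1 board_size (r : Int) (c : Int) v))

-- ===== PRECONDITION & SPEC =====
-- Pre_ requires level ≥ 0 (Python: 2**level is fractional for a negative level, so range()
-- raises TypeError) and, for positive board_size, a board with enough rows/columns for every
-- index A touches (otherwise IndexError).  It is slightly narrower than A's exact needs: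
-- it bounds ALL rows uniformly, so boards whose rows OUTSIDE the touched region are shorter
-- are excluded even though A returns there (B returns the same value; see the claim's cite).
def Pre_firestorm (ice_board : List (List Int)) (board_size : Int) (level : Int) : Prop :=
  0 ≤ level ∧
  (board_size ≤ 0 ∨
    ((board_size + 1 < (ice_board.length : Int) ∧
      ∀ row ∈ ice_board, board_size + 1 < (row.length : Int)) ∧
     ∀ r0 ∈ PySem.List.pyRange 1 board_size ((2 : Int) ^ level.toNat),
       r0 + 2 ^ level.toNat - 1 < (ice_board.length : Int) ∧
       ∀ row ∈ ice_board, r0 + 2 ^ level.toNat - 1 < (row.length : Int)))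

instance (ice_board : List (List Int)) (board_size : Int) (level : Int) : Decidable (Pre_firestorm ice_board board_size level) := by unfold Pre_firestorm; infer_instance

def pvWitness_firestorm : List (List Int) × Int × Int :=
  ([[0, 0, 0, 0], [0, 1, 2, 0], [0, 3, 4, 0], [0, 0, 0, 0]], 2, 1)

def Spec_firestorm (ice_board : List (List Int)) (board_size : Int) (level : Int) (out : List (List Int)) : Prop := out = firestorm_alt ice_board board_size level
instance (ice_board : List (List Int)) (board_size : Int) (level : Int) (out : List (List Int)) : Decidable (Spec_firestorm ice_board board_size level out) := by unfold Spec_firestorm; infer_instance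

-- ===== CLAIM (what is proved, stated in full; the proofs are below) =====
def Claim_equal_firestorm : Prop := ∀ (ice_board : List (List Int)) (board_size : Int) (level : Int), Dom_firestorm ice_board board_size level → Pre_firestorm ice_board board_size level → Spec_firestorm ice_board board_size level (firestorm ice_board board_size level)

-- ===== LEMMAS AND PROOFS =====

-- list of row lengths; every pass preserves it
def dims (g : List (List Int)) : List Nat := g.map List.length

lemma length_of_dims_eq {g g' : List (List Int)} (h : dims g = dims g') :
    g.length = g'.length := by
  simpa [dims] using congrArg List.length h

lemma len_getD (g : List (List Int)) (i : Nat) : (g.getD i []).length = (dims g).getD i 0 := by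
  simp only [dims, List.getD_eq_getElem?_getD, List.getElem?_map]
  cases g[i]? <;> simp

lemma rowlen_of_dims_eq {g g' : List (List Int)} (h : dims g = dims g') (i : Nat) :
    (g.getD i []).length = (g'.getD i []).length := by
  rw [len_getD, len_getD, h]

lemma rows_prop_of_dims_eq {g g' : List (List Int)} (h : dims g = dims g') (P : Nat → Prop)
    (hb : ∀ row ∈ g', P row.length) : ∀ row ∈ g, P row.length := by
  intro row hrow
  have h1 : row.length ∈ dims g := List.mem_map_of_mem hrow
  rw [h] at h1
  obtain ⟨row', hr', he⟩ := List.mem_map.mp h1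
  rw [← he]
  exact hb row' hr'

lemma dims_gset (g : List (List Int)) (x y v : Int) : dims (gset g x y v) = dims g := by
  unfold gset dims
  rw [List.map_set]
  by_cases hx : x.toNat < g.length
  · have h1 : ((g.getD x.toNat []).set y.toNat v).length = (g.map List.length)[x.toNat]'(by simpa using hx) := by
      simp [List.length_set, List.getD_eq_getElem?_getD, List.getElem?_eq_getElem hx]
    rw [h1, List.set_getElem_self]
  · exact List.set_eq_of_length_le (by simpa using Nat.le_of_not_lt hx)

lemma mem_getD (g : List (List Int)) (i : Nat) (h : i < g.length) : g.getD i [] ∈ g := by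
  rw [List.getD_eq_getElem?_getD, List.getElem?_eq_getElem h]
  exact List.getElem_mem h


lemma getD_lt {α : Type} (l : List α) (i : Nat) (d : α) (h : i < l.length) :
    l.getD i d = l[i] := by
  rw [List.getD_eq_getElem?_getD, List.getElem?_eq_getElem h]
  rfl

lemma getD_ge {α : Type} (l : List α) (i : Nat) (d : α) (h : l.length ≤ i) :
    l.getD i d = d := by
  rw [List.getD_eq_getElem?_getD, List.getElem?_eq_none h]
  rfl

lemma getD_set_lt {α : Type} (l : List α) (i : Nat) (a d : α) (h : i < l.length) :
    (l.set i a).getD i d = a := by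
  rw [List.getD_eq_getElem?_getD, List.getElem?_set_self h]
  rfl

lemma getD_set_ne {α : Type} (l : List α) (i i' : Nat) (a d : α) (h : i ≠ i') :
    (l.set i a).getD i' d = l.getD i' d := by
  rw [List.getD_eq_getElem?_getD, List.getElem?_set_ne h, ← List.getD_eq_getElem?_getD]

lemma getD_mapIdx_lt {α β : Type} (l : List α) (f : Nat → α → β) (i : Nat) (d : β)
    (h : i < l.length) : (l.mapIdx f).getD i d = f i l[i] := by
  rw [List.getD_eq_getElem?_getD, List.getElem?_mapIdx, List.getElem?_eq_getElem h]
  rfl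

lemma getD_mapIdx_ge {α β : Type} (l : List α) (f : Nat → α → β) (i : Nat) (d : β)
    (h : l.length ≤ i) : (l.mapIdx f).getD i d = d := by
  rw [List.getD_eq_getElem?_getD, List.getElem?_eq_none (by rw [List.length_mapIdx]; omega)]
  rfl

lemma getD_map_lt {α β : Type} (l : List α) (f : α → β) (i : Nat) (d : β)
    (h : i < l.length) : (l.map f).getD i d = f l[i] := by
  rw [List.getD_eq_getElem?_getD, List.getElem?_map, List.getElem?_eq_getElem h]
  rfl

lemma gget_gset_self (g : List (List Int)) (x y v : Int) (hx0 : 0 ≤ x)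
    (hx : x < (g.length : Int)) (hy0 : 0 ≤ y) (hy : y < ((g.getD x.toNat []).length : Int)) :
    gget (gset g x y v) x y = v := by
  have hx' : x.toNat < g.length := by omega
  have hy' : y.toNat < (g.getD x.toNat []).length := by omega
  unfold gget gset
  rw [getD_set_lt g x.toNat _ [] hx', getD_set_lt _ y.toNat v 0 hy']

lemma gget_gset_self_dims (g g0 : List (List Int)) (hd : dims g = dims g0) (x y v : Int)
    (hx0 : 0 ≤ x) (hx : x < (g0.length : Int)) (hy0 : 0 ≤ y)
    (hrow : ∀ row ∈ g0, y < (row.length : Int)) :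
    gget (gset g x y v) x y = v := by
  have hlg : g.length = g0.length := length_of_dims_eq hd
  apply gget_gset_self g x y v hx0 (by omega) hy0
  rw [rowlen_of_dims_eq hd]
  have hx' : x.toNat < g0.length := by omega
  have := hrow _ (mem_getD g0 x.toNat hx')
  omega

lemma gget_gset_ne (g : List (List Int)) (x y v x' y' : Int) (hx : 1 ≤ x) (hy : 1 ≤ y)
    (hne : ¬(x' = x ∧ y' = y)) : gget (gset g x y v) x' y' = gget g x' y' := by
  unfold gget gset
  by_cases hx'x : x' = x
  · subst hx'x
    have hyy : y.toNat ≠ y'.toNat := by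
      have : y' ≠ y := fun hc => hne ⟨rfl, hc⟩
      omega
    by_cases hr : x'.toNat < g.length
    · rw [getD_set_lt g x'.toNat _ [] hr, getD_set_ne _ y.toNat y'.toNat v 0 hyy]
    · rw [List.set_eq_of_length_le (by simpa using Nat.le_of_not_lt hr)]
  · have hxx : x.toNat ≠ x'.toNat := by
      have : x' ≠ x := hx'x
      omega
    rw [getD_set_ne g x.toNat x'.toNat _ [] hxx]

lemma gget_natCast (g : List (List Int)) (i j : Nat) :
    gget g (i : Int) (j : Int) = (g.getD i []).getD j 0 := by
  simp [gget]

lemma grid_ext {g g' : List (List Int)} (hd : dims g = dims g')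
    (h : ∀ i j : Nat, gget g (i : Int) (j : Int) = gget g' (i : Int) (j : Int)) : g = g' := by
  have hl : g.length = g'.length := length_of_dims_eq hd
  apply List.ext_getElem hl
  intro i h1 h2
  have hrl : g[i].length = g'[i].length := by
    have h3 := rowlen_of_dims_eq hd i
    rw [getD_lt g i [] h1, getD_lt g' i [] h2] at h3
    exact h3
  apply List.ext_getElem hrl
  intro j hj1 hj2
  have hh := h i j
  rw [gget_natCast, gget_natCast, getD_lt g i [] h1, getD_lt g' i [] h2,
    getD_lt _ j 0 hj1, getD_lt _ j 0 hj2] at hh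
  exact hh

lemma foldl_nested_eq_flatMap {α β γ : Type} (f : α → β × γ → α) (rs : List β) (cs : List γ)
    (init : α) :
    rs.foldl (fun a r => cs.foldl (fun a c => f a (r, c)) a) init
      = (rs.flatMap (fun r => cs.map (fun c => (r, c)))).foldl f init := by
  induction rs generalizing init with
  | nil => rfl
  | cons r rs ih => simp [List.foldl_append, List.foldl_map, ih]

lemma foldl_congr_inv {α β : Type} (P : α → Prop) (f f' : α → β → α) (l : List β) (init : α)
    (h0 : P init) (h : ∀ a b, b ∈ l → P a → f a b = f' a b ∧ P (f a b)) :
    l.foldl f init = l.foldl f' init ∧ P (l.foldl f init) := by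
  induction l generalizing init with
  | nil => exact ⟨rfl, h0⟩
  | cons b l ih =>
    obtain ⟨he, hp⟩ := h init b (by simp) h0
    have hrest := ih (f init b) hp (fun a b' hb' ha => h a b' (by simp [hb']) ha)
    refine ⟨?_, hrest.2⟩
    simp only [List.foldl_cons, he] at hrest ⊢
    exact hrest.1

-- quarter representative of a cell of the S×S block (S = 2h), local coordinates
def repQ (h a b : Int) : Int × Int :=
  if a < h then (if b < h then (a, b) else (2 * h - 1 - b, a))
  else (if b < h then (b, 2 * h - 1 - a) else (2 * h - 1 - a, 2 * h - 1 - b))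

abbrev inOrbit (h : Int) (q p : Int × Int) : Prop :=
  p = q ∨ p = (q.2, 2 * h - 1 - q.1) ∨ p = (2 * h - 1 - q.1, 2 * h - 1 - q.2) ∨
    p = (2 * h - 1 - q.2, q.1)

lemma inOrbit_iff_rep (h : Int) (q : Int × Int) (a b : Int)
    (hq : 0 ≤ q.1 ∧ q.1 < h ∧ 0 ≤ q.2 ∧ q.2 < h)
    (hab : 0 ≤ a ∧ a < 2 * h ∧ 0 ≤ b ∧ b < 2 * h) :
    inOrbit h q (a, b) ↔ repQ h a b = q := by
  obtain ⟨q1, q2⟩ := q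
  obtain ⟨hq1, hq2, hq3, hq4⟩ := hq
  simp only [inOrbit, repQ, Prod.mk.injEq]
  split_ifs <;> simp only [Prod.mk.injEq] <;> omega

lemma repQ_bounds (h a b : Int) (hh : 0 < h) (hab : 0 ≤ a ∧ a < 2 * h ∧ 0 ≤ b ∧ b < 2 * h) :
    0 ≤ (repQ h a b).1 ∧ (repQ h a b).1 < h ∧ 0 ≤ (repQ h a b).2 ∧ (repQ h a b).2 < h := by
  simp only [repQ]
  split_ifs <;> dsimp only <;> omega

lemma inOrbit_rot (h : Int) (q p : Int × Int) (hp : inOrbit h q p) :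
    inOrbit h q (2 * h - 1 - p.2, p.1) := by
  obtain ⟨q1, q2⟩ := q; obtain ⟨a, b⟩ := p
  simp only [inOrbit, Prod.mk.injEq] at hp ⊢
  omega

lemma spinStep_eq (sr sc S : Int) (g : List (List Int)) (q : Int × Int) :
    spinStep sr sc S g q =
      gset (gset (gset (gset g (sr + q.1) (sc + q.2) (gget g (sr + S - 1 - q.2) (sc + q.1)))
        (sr + q.2) (sc + S - 1 - q.1) (gget g (sr + q.1) (sc + q.2)))
        (sr + S - 1 - q.1) (sc + S - 1 - q.2) (gget g (sr + q.2) (sc + S - 1 - q.1)))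
        (sr + S - 1 - q.2) (sc + q.1) (gget g (sr + S - 1 - q.1) (sc + S - 1 - q.2)) := by
  rfl

lemma dims_spinStep (g : List (List Int)) (sr sc S : Int) (q : Int × Int) :
    dims (spinStep sr sc S g q) = dims g := by
  rw [spinStep_eq]
  simp [dims_gset]

-- pointwise effect of one 4-cycle swap iteration of spin_grids
lemma gget_spinStep (g : List (List Int)) (sr sc S h : Int) (q : Int × Int) (x y : Int)
    (hS : S = 2 * h) (hh : 1 ≤ h)
    (hq : 0 ≤ q.1 ∧ q.1 < h ∧ 0 ≤ q.2 ∧ q.2 < h)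
    (hsr : 1 ≤ sr) (hsc : 1 ≤ sc)
    (hlen : sr + S ≤ (g.length : Int)) (hrow : ∀ row ∈ g, sc + S ≤ (row.length : Int)) :
    gget (spinStep sr sc S g q) x y =
      if sr ≤ x ∧ x < sr + S ∧ sc ≤ y ∧ y < sc + S ∧ inOrbit h q (x - sr, y - sc)
      then gget g (sr + (S - 1 - (y - sc))) (sc + (x - sr)) else gget g x y := by
  obtain ⟨q1, q2⟩ := q
  obtain ⟨hq1, hq2, hq3, hq4⟩ := hq
  rw [spinStep_eq]
  dsimp only
  by_cases hBL : x = sr + S - 1 - q2 ∧ y = sc + q1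
  · obtain ⟨hx, hy⟩ := hBL
    subst hx; subst hy
    rw [gget_gset_self_dims _ g (by simp [dims_gset]) _ _ _ (by omega) (by omega) (by omega)
      (fun row hrm => by have := hrow row hrm; omega)]
    rw [if_pos ⟨by omega, by omega, by omega, by omega,
      by simp only [inOrbit, Prod.mk.injEq]; omega⟩]
    have e1 : sr + (S - 1 - (sc + q1 - sc)) = sr + S - 1 - q1 := by omega
    have e2 : sc + (sr + S - 1 - q2 - sr) = sc + S - 1 - q2 := by omega
    rw [e1, e2]
  · rw [gget_gset_ne _ _ _ _ x y (by omega) (by omega) hBL]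
    by_cases hBR : x = sr + S - 1 - q1 ∧ y = sc + S - 1 - q2
    · obtain ⟨hx, hy⟩ := hBR
      subst hx; subst hy
      rw [gget_gset_self_dims _ g (by simp [dims_gset]) _ _ _ (by omega) (by omega) (by omega)
        (fun row hrm => by have := hrow row hrm; omega)]
      rw [if_pos ⟨by omega, by omega, by omega, by omega,
        by simp only [inOrbit, Prod.mk.injEq]; omega⟩]
      have e1 : sr + (S - 1 - (sc + S - 1 - q2 - sc)) = sr + q2 := by omega
      have e2 : sc + (sr + S - 1 - q1 - sr) = sc + S - 1 - q1 := by omega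
      rw [e1, e2]
    · rw [gget_gset_ne _ _ _ _ x y (by omega) (by omega) hBR]
      by_cases hTR : x = sr + q2 ∧ y = sc + S - 1 - q1
      · obtain ⟨hx, hy⟩ := hTR
        subst hx; subst hy
        rw [gget_gset_self_dims _ g (by simp [dims_gset]) _ _ _ (by omega) (by omega) (by omega)
          (fun row hrm => by have := hrow row hrm; omega)]
        rw [if_pos ⟨by omega, by omega, by omega, by omega,
          by simp only [inOrbit, Prod.mk.injEq]; omega⟩]
        have e1 : sr + (S - 1 - (sc + S - 1 - q1 - sc)) = sr + q1 := by omega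
        have e2 : sc + (sr + q2 - sr) = sc + q2 := by omega
        rw [e1, e2]
      · rw [gget_gset_ne _ _ _ _ x y (by omega) (by omega) hTR]
        by_cases hTL : x = sr + q1 ∧ y = sc + q2
        · obtain ⟨hx, hy⟩ := hTL
          subst hx; subst hy
          rw [gget_gset_self_dims g g rfl _ _ _ (by omega) (by omega) (by omega)
            (fun row hrm => by have := hrow row hrm; omega)]
          rw [if_pos ⟨by omega, by omega, by omega, by omega,
            by simp only [inOrbit, Prod.mk.injEq]; omega⟩]
          have e1 : sr + (S - 1 - (sc + q2 - sc)) = sr + S - 1 - q2 := by omega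
          have e2 : sc + (sr + q1 - sr) = sc + q1 := by omega
          rw [e1, e2]
        · rw [gget_gset_ne _ _ _ _ x y (by omega) (by omega) hTL]
          rw [if_neg]
          rintro ⟨c1, c2, c3, c4, horb⟩
          simp only [inOrbit, Prod.mk.injEq] at horb
          rcases horb with hc | hc | hc | hc
          · exact hTL ⟨by omega, by omega⟩
          · exact hTR ⟨by omega, by omega⟩
          · exact hBR ⟨by omega, by omega⟩
          · exact hBL ⟨by omega, by omega⟩

-- pointwise effect of the whole quarter-loop of spin_grids
lemma gget_spinFold (g0 : List (List Int)) (sr sc S h : Int)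
    (hS : S = 2 * h) (hh : 1 ≤ h) (hsr : 1 ≤ sr) (hsc : 1 ≤ sc)
    (hlen : sr + S ≤ (g0.length : Int)) (hrow : ∀ row ∈ g0, sc + S ≤ (row.length : Int))
    (qs : List (Int × Int)) (hq : ∀ q ∈ qs, 0 ≤ q.1 ∧ q.1 < h ∧ 0 ≤ q.2 ∧ q.2 < h)
    (hnd : qs.Nodup) :
    ∀ g : List (List Int), dims g = dims g0 →
    (∀ x y, sr ≤ x → x < sr + S → sc ≤ y → y < sc + S →
      repQ h (x - sr) (y - sc) ∈ qs → gget g x y = gget g0 x y) →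
    (∀ x y, gget (qs.foldl (spinStep sr sc S) g) x y =
      if sr ≤ x ∧ x < sr + S ∧ sc ≤ y ∧ y < sc + S ∧ repQ h (x - sr) (y - sc) ∈ qs
      then gget g0 (sr + (S - 1 - (y - sc))) (sc + (x - sr)) else gget g x y)
    ∧ dims (qs.foldl (spinStep sr sc S) g) = dims g0 := by
  revert hq hnd
  induction qs with
  | nil =>
    intro hq hnd g hdims hagree
    refine ⟨fun x y => ?_, hdims⟩
    simp
  | cons q rest ih =>
    intro hq hnd g hdims hagree
    have hqq := hq q (by simp)
    obtain ⟨hqnotin, hndrest⟩ := List.nodup_cons.mp hnd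
    have hlg : g.length = g0.length := length_of_dims_eq hdims
    have hlen' : sr + S ≤ (g.length : Int) := by omega
    have hrow' : ∀ row ∈ g, sc + S ≤ (row.length : Int) :=
      rows_prop_of_dims_eq hdims (fun ℓ => sc + S ≤ (ℓ : Int)) hrow
    have hstep := fun x y => gget_spinStep g sr sc S h q x y hS hh hqq hsr hsc hlen' hrow'
    have hdims' : dims (spinStep sr sc S g q) = dims g0 := by
      rw [dims_spinStep]; exact hdims
    have hagree' : ∀ x y, sr ≤ x → x < sr + S → sc ≤ y → y < sc + S →
        repQ h (x - sr) (y - sc) ∈ rest → gget (spinStep sr sc S g q) x y = gget g0 x y := by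
      intro x y h1 h2 h3 h4 hmem
      rw [hstep x y]
      have hrepne : repQ h (x - sr) (y - sc) ≠ q := fun hc => hqnotin (hc ▸ hmem)
      have hnorb : ¬ inOrbit h q (x - sr, y - sc) := by
        rw [inOrbit_iff_rep h q _ _ hqq (by omega)]
        exact hrepne
      rw [if_neg (fun hC => hnorb hC.2.2.2.2)]
      exact hagree x y h1 h2 h3 h4 (by simp [hmem])
    obtain ⟨ihp, ihd⟩ := ih (fun q' hq' => hq q' (by simp [hq'])) hndrest
      (spinStep sr sc S g q) hdims' hagree'
    refine ⟨fun x y => ?_, ihd⟩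
    rw [List.foldl_cons, ihp x y, hstep x y]
    by_cases hin : sr ≤ x ∧ x < sr + S ∧ sc ≤ y ∧ y < sc + S
    · obtain ⟨h1, h2, h3, h4⟩ := hin
      have hiff := inOrbit_iff_rep h q (x - sr) (y - sc) hqq (by omega)
      by_cases hmem : repQ h (x - sr) (y - sc) ∈ rest
      · rw [if_pos ⟨h1, h2, h3, h4, hmem⟩, if_pos ⟨h1, h2, h3, h4, by simp [hmem]⟩]
      · by_cases heq : repQ h (x - sr) (y - sc) = q
        · rw [if_neg (fun hC => hmem hC.2.2.2.2),
            if_pos ⟨h1, h2, h3, h4, hiff.mpr heq⟩,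
            if_pos ⟨h1, h2, h3, h4, by simp [heq]⟩]
          apply hagree
          · omega
          · omega
          · omega
          · omega
          · have horb : inOrbit h q (x - sr, y - sc) := hiff.mpr heq
            have hrot := inOrbit_rot h q (x - sr, y - sc) horb
            have hiff2 := inOrbit_iff_rep h q (2 * h - 1 - (y - sc)) (x - sr) hqq (by omega)
            have e1 : sr + (S - 1 - (y - sc)) - sr = 2 * h - 1 - (y - sc) := by omega
            have e2 : sc + (x - sr) - sc = x - sr := by omega
            rw [e1, e2, hiff2.mp hrot]
            simp
        · rw [if_neg (fun hC => hmem hC.2.2.2.2),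
            if_neg (fun hC => heq (hiff.mp hC.2.2.2.2)),
            if_neg (fun hC => by
              rcases List.mem_cons.mp hC.2.2.2.2 with hc | hc
              · exact heq hc
              · exact hmem hc)]
    · rw [if_neg (fun hC => hin ⟨hC.1, hC.2.1, hC.2.2.1, hC.2.2.2.1⟩),
        if_neg (fun hC => hin ⟨hC.1, hC.2.1, hC.2.2.1, hC.2.2.2.1⟩),
        if_neg (fun hC => hin ⟨hC.1, hC.2.1, hC.2.2.1, hC.2.2.2.1⟩)]

-- element j of an equal-length slice write row[c:c+s] = mid
lemma splice_getD (row mid : List Int) (c s j : Nat) (hm : mid.length = s)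
    (hcs : c + s ≤ row.length) :
    (row.take c ++ mid ++ row.drop (c + s)).getD j 0 =
      if c ≤ j ∧ j < c + s then mid.getD (j - c) 0 else row.getD j 0 := by
  have htl : (row.take c).length = c := by rw [List.length_take]; omega
  have hlm : (row.take c ++ mid).length = c + s := by
    rw [List.length_append, htl, hm]
  by_cases hj : c ≤ j ∧ j < c + s
  · rw [if_pos hj]
    rw [List.getD_eq_getElem?_getD, List.getElem?_append_left (by rw [hlm]; omega),
      List.getElem?_append_right (by omega), htl, ← List.getD_eq_getElem?_getD]
  · rw [if_neg hj]
    rcases (by omega : j < c ∨ c + s ≤ j) with hlt | hge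
    · rw [List.getD_eq_getElem?_getD, List.getElem?_append_left (by rw [hlm]; omega),
        List.getElem?_append_left (by omega), List.getElem?_take, if_pos hlt,
        ← List.getD_eq_getElem?_getD]
    · rw [List.getD_eq_getElem?_getD, List.getElem?_append_right (by rw [hlm]; omega),
        List.getElem?_drop, hlm]
      have e : c + s + (j - (c + s)) = j := by omega
      rw [e, ← List.getD_eq_getElem?_getD]

-- pointwise description of B's rotateBlock
lemma gget_rotateBlock (g : List (List Int)) (r0 c0 S : Int) (x y : Int)
    (hr0 : 1 ≤ r0) (hc0 : 1 ≤ c0) (hS : 1 ≤ S)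
    (hlen : r0 + S ≤ (g.length : Int)) (hrow : ∀ row ∈ g, c0 + S ≤ (row.length : Int)) :
    gget (rotateBlock g r0 c0 S) x y =
      if r0 ≤ x ∧ x < r0 + S ∧ c0 ≤ y ∧ y < c0 + S
      then gget g (r0 + (S - 1 - (y - c0))) (c0 + (x - r0)) else gget g x y := by
  have hblock : ∀ a : Nat, (a : Int) < S →
      (((PySem.List.pyRange 0 S 1).map (fun a =>
        (PySem.List.pyRange 0 S 1).map (fun b => gget g (r0 + S - 1 - b) (c0 + a)))).getD a [])
        = (PySem.List.pyRange 0 S 1).map (fun b => gget g (r0 + S - 1 - b) (c0 + (a : Int))) := by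
    intro a ha
    have hal : a < (PySem.List.pyRange 0 S 1).length := by
      rw [PySem.List.length_pyRange_one]; omega
    rw [getD_map_lt _ _ a [] hal, PySem.List.getElem_pyRange_one]
    simp
  have hmain : gget (rotateBlock g r0 c0 S) x y
      = ((rotateBlock g r0 c0 S).getD x.toNat []).getD y.toNat 0 := rfl
  have hg : gget g x y = (g.getD x.toNat []).getD y.toNat 0 := rfl
  rw [hmain]
  simp only [rotateBlock]
  by_cases hxr : x.toNat < g.length
  · rw [getD_mapIdx_lt g _ x.toNat [] hxr]
    by_cases hxneg : x < 0
    · rw [if_neg (by omega), if_neg (by omega), hg, getD_lt g x.toNat [] hxr]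
    · have hxc : ((x.toNat : Nat) : Int) = x := by omega
      rw [hxc]
      by_cases hxin : r0 ≤ x ∧ x < r0 + S
      · rw [if_pos hxin]
        have hrowmem : g[x.toNat] ∈ g := List.getElem_mem hxr
        have hrl : c0 + S ≤ (g[x.toNat].length : Int) := hrow _ hrowmem
        have hmidlen : (((PySem.List.pyRange 0 S 1).map (fun a =>
            (PySem.List.pyRange 0 S 1).map (fun b => gget g (r0 + S - 1 - b) (c0 + a)))).getD
              (x - r0).toNat []).length = S.toNat := by
          rw [hblock (x - r0).toNat (by omega)]
          rw [List.length_map, PySem.List.length_pyRange_one]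
          omega
        have hcse : (c0 + S).toNat = c0.toNat + S.toNat := by omega
        rw [hcse, splice_getD _ _ c0.toNat S.toNat y.toNat hmidlen (by omega)]
        by_cases hyin : c0 ≤ y ∧ y < c0 + S
        · rw [if_pos (by omega : c0.toNat ≤ y.toNat ∧ y.toNat < c0.toNat + S.toNat),
            if_pos ⟨hxin.1, hxin.2, hyin.1, hyin.2⟩]
          rw [hblock (x - r0).toNat (by omega)]
          have hbl : y.toNat - c0.toNat < (PySem.List.pyRange 0 S 1).length := by
            rw [PySem.List.length_pyRange_one]; omega
          rw [getD_map_lt _ _ (y.toNat - c0.toNat) 0 hbl, PySem.List.getElem_pyRange_one]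
          have e1 : r0 + S - 1 - (0 + ((y.toNat - c0.toNat : Nat) : Int)) =
              r0 + (S - 1 - (y - c0)) := by omega
          have e2 : c0 + (((x - r0).toNat : Nat) : Int) = c0 + (x - r0) := by omega
          rw [e1, e2]
        · rw [if_neg (by omega : ¬(c0.toNat ≤ y.toNat ∧ y.toNat < c0.toNat + S.toNat)),
            if_neg (fun hC => hyin ⟨hC.2.2.1, hC.2.2.2⟩), hg, getD_lt g x.toNat [] hxr]
      · rw [if_neg hxin, if_neg (fun hC => hxin ⟨hC.1, hC.2.1⟩), hg, getD_lt g x.toNat [] hxr]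
  · rw [getD_mapIdx_ge g _ x.toNat [] (by omega)]
    rw [if_neg (by intro hC; omega), hg, getD_ge g x.toNat [] (by omega)]

lemma dims_rotateBlock (g : List (List Int)) (r0 c0 S : Int)
    (hc0 : 1 ≤ c0) (hS : 1 ≤ S) (hrow : ∀ row ∈ g, c0 + S ≤ (row.length : Int)) :
    dims (rotateBlock g r0 c0 S) = dims g := by
  simp only [rotateBlock, dims]
  apply List.ext_getElem (by simp)
  intro i h1 h2
  simp only [List.getElem_map, List.getElem_mapIdx]
  split_ifs with hc
  · have hrl : c0 + S ≤ ((g[i]'(by simpa using h2)).length : Int) :=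
      hrow _ (List.getElem_mem (by simpa using h2))
    have hblen : (((PySem.List.pyRange 0 S 1).map (fun a =>
        (PySem.List.pyRange 0 S 1).map (fun b => gget g (r0 + S - 1 - b) (c0 + a)))).getD
          ((i : Int) - r0).toNat []).length = S.toNat := by
      have hal : ((i : Int) - r0).toNat < (PySem.List.pyRange 0 S 1).length := by
        rw [PySem.List.length_pyRange_one]; omega
      rw [getD_map_lt _ _ ((i : Int) - r0).toNat [] hal]
      rw [List.length_map, PySem.List.length_pyRange_one]
      omega
    rw [List.length_append, List.length_append, List.length_take, List.length_drop, hblen]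
    omega
  · rfl

-- one whole subgrid: A's spin_grids equals B's rotateBlock
lemma spin_eq_rotate (g : List (List Int)) (r0 c0 L : Int) (hL : 0 ≤ L)
    (hr0 : 1 ≤ r0) (hc0 : 1 ≤ c0)
    (hlen : r0 + 2 ^ L.toNat ≤ (g.length : Int))
    (hrow : ∀ row ∈ g, c0 + 2 ^ L.toNat ≤ (row.length : Int)) :
    spinGrids g (r0, c0) L = rotateBlock g r0 c0 (2 ^ L.toNat) := by
  have hS1 : (1 : Int) ≤ 2 ^ L.toNat := by
    have := pow_pos (show (0 : Int) < 2 by norm_num) L.toNat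
    omega
  by_cases hL1 : L < 1
  · have hL0 : L = 0 := by omega
    subst hL0
    have hA : spinGrids g (r0, c0) 0 = g := by simp [spinGrids]
    rw [hA]
    have hSe : ((2 : Int) ^ (0 : Int).toNat) = 1 := by norm_num
    apply grid_ext (dims_rotateBlock g r0 c0 _ hc0 hS1 hrow).symm
    intro i j
    rw [gget_rotateBlock g r0 c0 _ _ _ hr0 hc0 hS1 hlen hrow]
    rw [hSe]
    by_cases hin : r0 ≤ (i : Int) ∧ (i : Int) < r0 + 1 ∧ c0 ≤ (j : Int) ∧ (j : Int) < c0 + 1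
    · rw [if_pos hin]
      have e1 : r0 + (1 - 1 - ((j : Int) - c0)) = (i : Int) := by omega
      have e2 : c0 + ((i : Int) - r0) = (j : Int) := by omega
      rw [e1, e2]
    · rw [if_neg hin]
  · have h1L : 1 ≤ L := by omega
    have hLt : L.toNat = (L - 1).toNat + 1 := by omega
    have hS : ((2 : Int) ^ L.toNat) = 2 * 2 ^ (L - 1).toNat := by
      rw [hLt, pow_succ]; ring
    have hh : (1 : Int) ≤ 2 ^ (L - 1).toNat := by
      have := pow_pos (show (0 : Int) < 2 by norm_num) (L - 1).toNat
      omega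
    have hsg : spinGrids g (r0, c0) L =
        ((PySem.List.pyRange 0 (2 ^ (L - 1).toNat) 1).flatMap (fun r =>
          (PySem.List.pyRange 0 (2 ^ (L - 1).toNat) 1).map (fun c => (r, c)))).foldl
          (spinStep r0 c0 (2 ^ L.toNat)) g := by
      simp only [spinGrids]
      rw [if_neg (by omega : ¬ L < 1)]
      exact foldl_nested_eq_flatMap (spinStep r0 c0 (2 ^ L.toNat)) _ _ g
    rw [hsg]
    have hmemqs : ∀ p : Int × Int,
        p ∈ ((PySem.List.pyRange 0 (2 ^ (L - 1).toNat) 1).flatMap (fun r =>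
          (PySem.List.pyRange 0 (2 ^ (L - 1).toNat) 1).map (fun c => (r, c)))) ↔
        (0 ≤ p.1 ∧ p.1 < 2 ^ (L - 1).toNat ∧ 0 ≤ p.2 ∧ p.2 < 2 ^ (L - 1).toNat) := by
      intro p
      simp only [List.mem_flatMap, List.mem_map, PySem.List.mem_pyRange_one]
      constructor
      · rintro ⟨a, ha, b, hb, rfl⟩
        exact ⟨ha.1, ha.2, hb.1, hb.2⟩
      · intro hp
        exact ⟨p.1, ⟨hp.1, hp.2.1⟩, p.2, ⟨hp.2.2.1, hp.2.2.2⟩, rfl⟩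
    have hnd : ((PySem.List.pyRange 0 (2 ^ (L - 1).toNat) 1).flatMap (fun r =>
        (PySem.List.pyRange 0 (2 ^ (L - 1).toNat) 1).map (fun c => (r, c)))).Nodup := by
      simpa [List.product] using
        List.Nodup.product (PySem.List.nodup_pyRange_one 0 (2 ^ (L - 1).toNat))
          (PySem.List.nodup_pyRange_one 0 (2 ^ (L - 1).toNat))
    obtain ⟨hp, hd⟩ := gget_spinFold g r0 c0 (2 ^ L.toNat) (2 ^ (L - 1).toNat)
      hS hh hr0 hc0 hlen hrow _ (fun q hq => (hmemqs q).mp hq) hnd g rfl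
      (fun _ _ _ _ _ _ _ => rfl)
    apply grid_ext (hd.trans (dims_rotateBlock g r0 c0 _ hc0 hS1 hrow).symm)
    intro i j
    rw [hp (i : Int) (j : Int), gget_rotateBlock g r0 c0 _ _ _ hr0 hc0 hS1 hlen hrow]
    by_cases hin : r0 ≤ (i : Int) ∧ (i : Int) < r0 + 2 ^ L.toNat ∧
        c0 ≤ (j : Int) ∧ (j : Int) < c0 + 2 ^ L.toNat
    · obtain ⟨c1, c2, c3, c4⟩ := hin
      have hrb := repQ_bounds (2 ^ (L - 1).toNat) ((i : Int) - r0) ((j : Int) - c0)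
        (by omega) (by omega)
      rw [if_pos ⟨c1, c2, c3, c4, (hmemqs _).mpr hrb⟩, if_pos ⟨c1, c2, c3, c4⟩]
    · rw [if_neg (fun hC => hin ⟨hC.1, hC.2.1, hC.2.2.1, hC.2.2.2.1⟩), if_neg hin]

-- pointwise effect of A's inner melting loop (row r)
lemma gget_meltInner (ice : List (List Int)) (r : Int) (hr : 1 ≤ r)
    (cs : List Int) (hc : ∀ c ∈ cs, 1 ≤ c) (hnd : cs.Nodup) :
    ∀ m : List (List Int), r < (m.length : Int) →
    (∀ c ∈ cs, c < ((m.getD r.toNat []).length : Int)) →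
    (∀ x y, gget (cs.foldl (meltStep ice r) m) x y =
      if x = r ∧ y ∈ cs ∧
          (1 < List.count 0 [gget ice (r - 1) y, gget ice (r + 1) y, gget ice r (y - 1),
                gget ice r (y + 1)] ∧ 0 < gget ice r y)
      then gget m x y - 1 else gget m x y)
    ∧ dims (cs.foldl (meltStep ice r) m) = dims m := by
  revert hc hnd
  induction cs with
  | nil =>
    intro hc hnd m hlen hrowm
    refine ⟨fun x y => ?_, rfl⟩
    simp
  | cons c rest ih =>
    intro hc hnd m hlen hrowm
    have hcc := hc c (by simp)
    obtain ⟨hcnotin, hndrest⟩ := List.nodup_cons.mp hnd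
    have hstep : ∀ x y, gget (meltStep ice r m c) x y =
        if x = r ∧ y = c ∧
            (1 < List.count 0 [gget ice (r - 1) c, gget ice (r + 1) c, gget ice r (c - 1),
                  gget ice r (c + 1)] ∧ 0 < gget ice r c)
        then gget m x y - 1 else gget m x y := by
      intro x y
      simp only [meltStep]
      by_cases hcond : 1 < List.count 0 [gget ice (r - 1) c, gget ice (r + 1) c,
          gget ice r (c - 1), gget ice r (c + 1)] ∧ 0 < gget ice r c
      · rw [if_pos hcond]
        by_cases hxy : x = r ∧ y = c
        · obtain ⟨hx, hy⟩ := hxy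
          subst hx; subst hy
          rw [gget_gset_self m x y _ (by omega) hlen (by omega) (hrowm y (by simp))]
          rw [if_pos ⟨rfl, rfl, hcond⟩]
        · rw [gget_gset_ne m r c _ x y hr hcc (fun hC => hxy ⟨hC.1, hC.2⟩)]
          rw [if_neg (fun hC => hxy ⟨hC.1, hC.2.1⟩)]
      · rw [if_neg hcond, if_neg (fun hC => hcond hC.2.2)]
    have hdstep : dims (meltStep ice r m c) = dims m := by
      simp only [meltStep]
      split_ifs
      · exact dims_gset m r c _
      · rfl
    have hlen' : r < ((meltStep ice r m c).length : Int) := by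
      have := length_of_dims_eq hdstep
      omega
    have hrowm' : ∀ c' ∈ rest, c' < (((meltStep ice r m c).getD r.toNat []).length : Int) := by
      intro c' hc'
      rw [rowlen_of_dims_eq hdstep]
      exact hrowm c' (by simp [hc'])
    obtain ⟨ihp, ihd⟩ := ih (fun c' hc' => hc c' (by simp [hc'])) hndrest
      (meltStep ice r m c) hlen' hrowm'
    refine ⟨fun x y => ?_, ihd.trans hdstep⟩
    rw [List.foldl_cons, ihp x y, hstep x y]
    by_cases hx : x = r
    · subst hx
      by_cases hyrest : y ∈ rest
      · have hyne : y ≠ c := fun hc' => hcnotin (hc' ▸ hyrest)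
        by_cases hcond : 1 < List.count 0 [gget ice (x - 1) y, gget ice (x + 1) y,
            gget ice x (y - 1), gget ice x (y + 1)] ∧ 0 < gget ice x y
        · rw [if_pos ⟨rfl, hyrest, hcond⟩, if_neg (fun hC => hyne hC.2.1),
            if_pos ⟨rfl, by simp [hyrest], hcond⟩]
        · rw [if_neg (fun hC => hcond hC.2.2), if_neg (fun hC => hyne hC.2.1),
            if_neg (fun hC => hcond hC.2.2)]
      · by_cases hyc : y = c
        · subst hyc
          rw [if_neg (fun hC => hyrest hC.2.1)]
          by_cases hcond : 1 < List.count 0 [gget ice (x - 1) y, gget ice (x + 1) y,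
              gget ice x (y - 1), gget ice x (y + 1)] ∧ 0 < gget ice x y
          · rw [if_pos ⟨rfl, rfl, hcond⟩, if_pos ⟨rfl, by simp, hcond⟩]
          · rw [if_neg (fun hC => hcond hC.2.2), if_neg (fun hC => hcond hC.2.2)]
        · rw [if_neg (fun hC => hyrest hC.2.1), if_neg (fun hC => hyc hC.2.1),
            if_neg (fun hC => by
              rcases List.mem_cons.mp hC.2.1 with hcm | hcm
              · exact hyc hcm
              · exact hyrest hcm)]
    · rw [if_neg (fun hC => hx hC.1), if_neg (fun hC => hx hC.1), if_neg (fun hC => hx hC.1)]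

-- pointwise effect of A's full melting pass, generalized over the list of row indices
lemma gget_meltRows (ice : List (List Int)) (n : Int) (rs : List Int)
    (hrs : ∀ r ∈ rs, 1 ≤ r ∧ r ≤ n) (hnd : rs.Nodup)
    (hlen : n + 1 < (ice.length : Int)) (hrow : ∀ row ∈ ice, n + 1 < (row.length : Int)) :
    ∀ m : List (List Int), dims m = dims ice →
    (∀ x y, gget (rs.foldl (fun m r =>
        (PySem.List.pyRange 1 (n + 1) 1).foldl (meltStep ice r) m) m) x y =
      if x ∈ rs ∧ y ∈ PySem.List.pyRange 1 (n + 1) 1 ∧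
          (1 < List.count 0 [gget ice (x - 1) y, gget ice (x + 1) y, gget ice x (y - 1),
                gget ice x (y + 1)] ∧ 0 < gget ice x y)
      then gget m x y - 1 else gget m x y)
    ∧ dims (rs.foldl (fun m r =>
        (PySem.List.pyRange 1 (n + 1) 1).foldl (meltStep ice r) m) m) = dims ice := by
  revert hrs hnd
  induction rs with
  | nil =>
    intro hrs hnd m hdims
    refine ⟨fun x y => ?_, hdims⟩
    simp
  | cons r rest ih =>
    intro hrs hnd m hdims
    obtain ⟨hr1, hrn⟩ := hrs r (by simp)
    obtain ⟨hrnotin, hndrest⟩ := List.nodup_cons.mp hnd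
    have hlm : m.length = ice.length := length_of_dims_eq hdims
    have hlen' : r < (m.length : Int) := by omega
    have hrowm : ∀ c ∈ PySem.List.pyRange 1 (n + 1) 1,
        c < ((m.getD r.toNat []).length : Int) := by
      intro c hcmem
      obtain ⟨hc1, hc2⟩ := PySem.List.mem_pyRange_one.mp hcmem
      rw [rowlen_of_dims_eq hdims]
      have h2 := hrow (ice.getD r.toNat []) (mem_getD ice r.toNat (by omega))
      omega
    obtain ⟨innp, innd⟩ := gget_meltInner ice r hr1 (PySem.List.pyRange 1 (n + 1) 1)
      (fun c hcm => (PySem.List.mem_pyRange_one.mp hcm).1)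
      (PySem.List.nodup_pyRange_one 1 (n + 1)) m hlen' hrowm
    obtain ⟨ihp, ihd⟩ := ih (fun r' hr' => hrs r' (by simp [hr'])) hndrest
      ((PySem.List.pyRange 1 (n + 1) 1).foldl (meltStep ice r) m) (innd.trans hdims)
    refine ⟨fun x y => ?_, ihd⟩
    rw [List.foldl_cons, ihp x y, innp x y]
    by_cases hInner : x = r ∧ y ∈ PySem.List.pyRange 1 (n + 1) 1 ∧
        (1 < List.count 0 [gget ice (r - 1) y, gget ice (r + 1) y, gget ice r (y - 1),
              gget ice r (y + 1)] ∧ 0 < gget ice r y)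
    · rw [if_pos hInner,
        if_neg (fun hO => hrnotin (by rw [← hInner.1]; exact hO.1)),
        if_pos ⟨by simp [hInner.1], hInner.2.1, by rw [hInner.1]; exact hInner.2.2⟩]
    · rw [if_neg hInner]
      by_cases hOuter : x ∈ rest ∧ y ∈ PySem.List.pyRange 1 (n + 1) 1 ∧
          (1 < List.count 0 [gget ice (x - 1) y, gget ice (x + 1) y, gget ice x (y - 1),
                gget ice x (y + 1)] ∧ 0 < gget ice x y)
      · rw [if_pos hOuter, if_pos ⟨by simp [hOuter.1], hOuter.2.1, hOuter.2.2⟩]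
      · have hTneg : ¬(x ∈ r :: rest ∧ y ∈ PySem.List.pyRange 1 (n + 1) 1 ∧
            (1 < List.count 0 [gget ice (x - 1) y, gget ice (x + 1) y, gget ice x (y - 1),
                  gget ice x (y + 1)] ∧ 0 < gget ice x y)) := by
          rintro ⟨hmem, hY1, hY2⟩
          rcases List.mem_cons.mp hmem with hcm | hcm
          · exact hInner ⟨hcm, hY1, by rw [← hcm]; exact hY2⟩
          · exact hOuter ⟨hcm, hY1, hY2⟩
        rw [if_neg hOuter, if_neg hTneg]

-- the rotation passes of A and B agree (and preserve dims)
lemma rotation_pass_eq (g : List (List Int)) (n L : Int) (hL : 0 ≤ L)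
    (hstarts : ∀ r0 ∈ PySem.List.pyRange 1 n ((2 : Int) ^ L.toNat),
      r0 + 2 ^ L.toNat - 1 < (g.length : Int) ∧
      ∀ row ∈ g, r0 + 2 ^ L.toNat - 1 < (row.length : Int)) :
    (PySem.List.pyRange 1 n ((2 : Int) ^ L.toNat)).foldl (fun g' r =>
        (PySem.List.pyRange 1 n ((2 : Int) ^ L.toNat)).foldl
          (fun g'' c => spinGrids g'' (r, c) L) g') g
      = (PySem.List.pyRange 1 n ((2 : Int) ^ L.toNat)).foldl (fun g' r0 =>
        (PySem.List.pyRange 1 n ((2 : Int) ^ L.toNat)).foldl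
          (fun g'' c0 => rotateBlock g'' r0 c0 (2 ^ L.toNat)) g') g
    ∧ dims ((PySem.List.pyRange 1 n ((2 : Int) ^ L.toNat)).foldl (fun g' r =>
        (PySem.List.pyRange 1 n ((2 : Int) ^ L.toNat)).foldl
          (fun g'' c => spinGrids g'' (r, c) L) g') g) = dims g := by
  have hpow : (0 : Int) < 2 ^ L.toNat := by positivity
  have hpow1 : (1 : Int) ≤ 2 ^ L.toNat := hpow
  have hkey : ∀ g' : List (List Int), dims g' = dims g →
      ∀ r0 ∈ PySem.List.pyRange 1 n ((2 : Int) ^ L.toNat),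
      ∀ c0 ∈ PySem.List.pyRange 1 n ((2 : Int) ^ L.toNat),
      spinGrids g' (r0, c0) L = rotateBlock g' r0 c0 (2 ^ L.toNat) ∧
        (∀ row ∈ g', c0 + 2 ^ L.toNat ≤ (row.length : Int)) := by
    intro g' hd r0 hr0 c0 hc0
    obtain ⟨hr0a, _, _⟩ := (PySem.List.mem_pyRange_iff_of_pos hpow r0).mp hr0
    obtain ⟨hc0a, _, _⟩ := (PySem.List.mem_pyRange_iff_of_pos hpow c0).mp hc0
    have hlg : g'.length = g.length := length_of_dims_eq hd
    have hb1 := (hstarts r0 hr0).1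
    have hb2 := (hstarts c0 hc0).2
    have hrows : ∀ row ∈ g', c0 + 2 ^ L.toNat ≤ (row.length : Int) :=
      rows_prop_of_dims_eq hd (fun ℓ => c0 + 2 ^ L.toNat ≤ (ℓ : Int))
        (fun row hm => by have := hb2 row hm; omega)
    exact ⟨spin_eq_rotate g' r0 c0 L hL hr0a hc0a (by omega) hrows, hrows⟩
  apply foldl_congr_inv (fun g' => dims g' = dims g) _ _ _ g rfl
  intro a r0 hr0 hPa
  have hinner := foldl_congr_inv (fun g' => dims g' = dims g)
    (fun g'' c => spinGrids g'' (r0, c) L)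
    (fun g'' c0 => rotateBlock g'' r0 c0 (2 ^ L.toNat))
    (PySem.List.pyRange 1 n ((2 : Int) ^ L.toNat)) a hPa ?_
  · exact ⟨hinner.1, hinner.2⟩
  · intro b c0 hc0 hPb
    obtain ⟨heq, hrows⟩ := hkey b hPb r0 hr0 c0 hc0
    obtain ⟨hc0a, _, _⟩ := (PySem.List.mem_pyRange_iff_of_pos hpow c0).mp hc0
    refine ⟨heq, ?_⟩
    show dims (spinGrids b (r0, c0) L) = dims g
    rw [heq, dims_rotateBlock b r0 c0 _ hc0a (by omega) hrows]
    exact hPb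

-- A's zero-count of neighbor values = B's length of the filtered neighbor-position list
lemma count_eq_filter_zeros (ice : List (List Int)) (r c : Int) :
    List.count 0 [gget ice (r - 1) c, gget ice (r + 1) c, gget ice r (c - 1),
        gget ice r (c + 1)]
      = ([((r - 1, c)), ((r + 1, c)), ((r, c - 1)), ((r, c + 1))].filter
          (fun p => gget ice p.1 p.2 == 0)).length := by
  rcases Bool.eq_false_or_eq_true (gget ice (r - 1) c == 0) with h1 | h1 <;>
  rcases Bool.eq_false_or_eq_true (gget ice (r + 1) c == 0) with h2 | h2 <;>
  rcases Bool.eq_false_or_eq_true (gget ice r (c - 1) == 0) with h3 | h3 <;>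
  rcases Bool.eq_false_or_eq_true (gget ice r (c + 1) == 0) with h4 | h4 <;>
  simp [List.count_cons, List.count_nil, List.filter, h1, h2, h3, h4]

lemma meltCell_zero (ice : List (List Int)) (n r c : Int) : meltCell ice n r c 0 = 0 := by
  unfold meltCell
  rw [if_neg]
  rintro ⟨_, _, _, _, hv⟩
  exact absurd hv (lt_irrefl 0)

-- B's melting comprehension, pointwise
lemma gget_meltB (g : List (List Int)) (n : Int) (i j : Nat) :
    gget (g.mapIdx (fun r row => row.mapIdx (fun c v => meltCell g n (r : Int) (c : Int) v)))
        (i : Int) (j : Int)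
      = meltCell g n (i : Int) (j : Int) (gget g (i : Int) (j : Int)) := by
  rw [gget_natCast, gget_natCast]
  by_cases hi : i < g.length
  · rw [getD_mapIdx_lt g _ i [] hi]
    rw [getD_lt g i [] hi]
    by_cases hj : j < g[i].length
    · rw [getD_mapIdx_lt _ _ j 0 hj, getD_lt _ j 0 hj]
    · rw [getD_mapIdx_ge _ _ j 0 (by omega), getD_ge _ j 0 (by omega)]
      exact (meltCell_zero g n _ _).symm
  · rw [getD_mapIdx_ge g _ i [] (by omega), getD_ge g i [] (by omega)]
    exact (meltCell_zero g n _ _).symm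

lemma dims_meltB (g : List (List Int)) (n : Int) :
    dims (g.mapIdx (fun r row => row.mapIdx (fun c v => meltCell g n (r : Int) (c : Int) v)))
      = dims g := by
  unfold dims
  apply List.ext_getElem (by simp)
  intro i h1 h2
  simp [List.getElem_mapIdx]

-- the melted value: A's formulation = B's meltCell
lemma melt_cell_match (ice : List (List Int)) (n : Int) (x y : Int) :
    (if (1 ≤ x ∧ x < n + 1) ∧ (1 ≤ y ∧ y < n + 1) ∧
        (1 < List.count 0 [gget ice (x - 1) y, gget ice (x + 1) y, gget ice x (y - 1),
              gget ice x (y + 1)] ∧ 0 < gget ice x y)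
     then gget ice x y - 1 else gget ice x y) = meltCell ice n x y (gget ice x y) := by
  unfold meltCell
  rw [count_eq_filter_zeros]
  split_ifs <;> omega

-- ===== VERDICT (by name: the statement is the Claim_ definition above) =====
theorem firestorm_spec : Claim_equal_firestorm := by
  intro g n L _ hpre
  unfold Spec_firestorm
  obtain ⟨hL, hcase⟩ := hpre
  show firestorm g n L = firestorm_alt g n L
  rcases hcase with hn | ⟨⟨hlen, hrow⟩, hstarts⟩
  · -- board_size ≤ 0: no subgrids, no melting; both return the board unchanged
    have hpow : (0 : Int) < 2 ^ L.toNat := by positivity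
    have he1 : PySem.List.pyRange 1 n ((2 : Int) ^ L.toNat) = [] := by
      apply List.eq_nil_iff_forall_not_mem.mpr
      intro a ha
      obtain ⟨h1, h2, _⟩ := (PySem.List.mem_pyRange_iff_of_pos hpow a).mp ha
      omega
    have he2 : PySem.List.pyRange 1 (n + 1) 1 = [] :=
      PySem.List.pyRange_one_eq_nil (by omega)
    simp only [firestorm, firestorm_alt, he1, he2, List.foldl_nil]
    apply grid_ext (dims_meltB g n).symm
    intro i j
    rw [gget_meltB g n i j]
    unfold meltCell
    rw [if_neg]
    rintro ⟨ha, hb, _⟩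
    omega
  · -- general case: equal rotation passes, then equal melting passes
    obtain ⟨hrotEq, hrotDims⟩ := rotation_pass_eq g n L hL hstarts
    simp only [firestorm, firestorm_alt]
    rw [← hrotEq]
    set G1 := (PySem.List.pyRange 1 n ((2 : Int) ^ L.toNat)).foldl (fun g' r =>
        (PySem.List.pyRange 1 n ((2 : Int) ^ L.toNat)).foldl
          (fun g'' c => spinGrids g'' (r, c) L) g') g
    have hlenG1 : n + 1 < (G1.length : Int) := by
      have := length_of_dims_eq hrotDims
      omega
    have hrowG1 : ∀ row ∈ G1, n + 1 < (row.length : Int) :=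
      rows_prop_of_dims_eq hrotDims (fun ℓ => n + 1 < (ℓ : Int)) hrow
    obtain ⟨hmelt, hmdims⟩ := gget_meltRows G1 n (PySem.List.pyRange 1 (n + 1) 1)
      (fun r hrm => by
        obtain ⟨ha, hb⟩ := PySem.List.mem_pyRange_one.mp hrm
        exact ⟨ha, by omega⟩)
      (PySem.List.nodup_pyRange_one 1 (n + 1)) hlenG1 hrowG1 G1 rfl
    apply grid_ext (hmdims.trans (dims_meltB G1 n).symm)
    intro i j
    rw [hmelt (i : Int) (j : Int), gget_meltB G1 n i j,
      ← melt_cell_match G1 n (i : Int) (j : Int)]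
    simp only [PySem.List.mem_pyRange_one]
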